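-- pv_equiv track=rewrite | github.com/KEEMSY/Bae-joonHub- | 백준/Gold/13549. 숨바꼭질 3/숨바꼭질 3.py | bfs
-- ===== SOURCE A (Python) =====
-- from collections import deque
--
-- def bfs(N, K):
--     visited = [False] * 100001
--
--     queue = deque([(N, 0)])
--     visited[N] = True
--
--     while queue:
--         current_pos, current_time = queue.popleft()
--
--         if current_pos == K:
--             return current_time
--
--         for next_pos in (current_pos - 1, current_pos + 1, current_pos * 2):
--             if 0 <= next_pos <= 100000 and not visited[next_pos]:
--                 visited[next_pos] = True
--                 if next_pos == current_pos * 2: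
--                     queue.appendleft((next_pos, current_time))
--                 else:
--                     queue.append((next_pos, current_time + 1))
--     return -1
-- ===== SOURCE B (Python) =====
-- def bfs(N, K):
--     # 0-1 BFS restructured: per-distance layer lists with the free doubling
--     # chain followed inline, instead of a deque of (pos, time) pairs.
--     visited = [False] * 100001
--     visited[N] = True
--     cur, t = [N], 0
--     while cur:
--         nxt = []
--         for p in cur:
--             x = p
--             while True:
--                 if x == K:
--                     return t
--                 for d in (x - 1, x + 1):
--                     if 0 <= d <= 100000 and not visited[d] and d != 2 * x:
--                         visited[d] = True
--                         nxt.append(d)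
--                 y = 2 * x
--                 if 0 <= y <= 100000 and not visited[y]:
--                     visited[y] = True
--                     x = y
--                 else:
--                     break
--         cur, t = nxt, t + 1
--     return -1
-- ===== Notes on version B (the rewrite author's own statement) =====
-- stated objective: alternative
-- what changed: The deque of (pos, time) pairs with appendleft for 0-cost doubling edges is replaced by per-distance layer lists: an outer loop over distance layers with a counter t, and an inner loop that follows the free doubling chain of each layer element inline while collecting the +-1 neighbours into the next layer, so no per-node time and no deque are maintained.
import Mathlib
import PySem

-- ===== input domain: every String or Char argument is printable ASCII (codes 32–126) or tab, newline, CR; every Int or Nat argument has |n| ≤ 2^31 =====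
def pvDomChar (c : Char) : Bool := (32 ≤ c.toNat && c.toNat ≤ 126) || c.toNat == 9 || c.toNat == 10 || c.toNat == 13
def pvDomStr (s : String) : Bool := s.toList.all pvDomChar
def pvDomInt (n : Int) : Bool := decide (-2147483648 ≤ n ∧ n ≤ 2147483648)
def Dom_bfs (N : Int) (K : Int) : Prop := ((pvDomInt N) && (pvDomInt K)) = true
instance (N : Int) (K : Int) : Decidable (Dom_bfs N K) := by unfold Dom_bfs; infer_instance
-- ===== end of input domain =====

-- B replaces A's deque of (pos, time) pairs by per-distance layer lists with the
-- 0-cost doubling chain followed inline (objective: alternative structure, same cost).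
-- Both ports model the visited array as the set of indices set to True, and carry an
-- identical fuel counter (one unit per processed position) only to make the loops
-- structurally recursive; 300000 exceeds the ≤ 100002 possible iterations, and the
-- lockstep equivalence below holds for every fuel value anyway.

-- `visited[i] = True` for -100001 ≤ i < 0 hits index i + 100001 (Python negative
-- indexing); both Pythons mark the start with the same idiom, so both ports share it.
def pvWrap (i : Int) : Int := if i < 0 then i + 100001 else i

-- ===== PORT A =====
-- one candidate `next_pos` each, in the tuple order (p-1, p+1, p*2):
-- guard, mark visited, append / appendleft exactly as the Python does
def aStep1 (vis : Std.HashSet Int) (q : List (Int × Int)) (p t : Int) :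
    Std.HashSet Int × List (Int × Int) :=
  if 0 ≤ p - 1 ∧ p - 1 ≤ 100000 ∧ vis.contains (p-1) = false then
    (vis.insert (p-1), q ++ [(p-1, t+1)]) else (vis, q)

def aStep2 (vis : Std.HashSet Int) (q : List (Int × Int)) (p t : Int) :
    Std.HashSet Int × List (Int × Int) :=
  if 0 ≤ p + 1 ∧ p + 1 ≤ 100000 ∧ vis.contains (p+1) = false then
    (vis.insert (p+1), if p + 1 = 2*p then (p+1, t) :: q else q ++ [(p+1, t+1)])
  else (vis, q)

def aStep3 (vis : Std.HashSet Int) (q : List (Int × Int)) (p t : Int) :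
    Std.HashSet Int × List (Int × Int) :=
  if 0 ≤ 2*p ∧ 2*p ≤ 100000 ∧ vis.contains (2*p) = false then
    (vis.insert (2*p), (2*p, t) :: q) else (vis, q)

-- the `while queue:` loop
def bfsLoop (K : Int) (fuel : Nat) (vis : Std.HashSet Int) (queue : List (Int × Int)) : Int :=
  match queue with
  | [] => -1
  | (p, t) :: rest =>
    match fuel with
    | 0 => -1
    | Nat.succ fuel =>
      if p = K then t
      else
        let s1 := aStep1 vis rest p t
        let s2 := aStep2 s1.1 s1.2 p t
        let s3 := aStep3 s2.1 s2.2 p t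
        bfsLoop K fuel s3.1 s3.2

def bfs (N : Int) (K : Int) : Int :=
  bfsLoop K 300000 ((Std.HashSet.emptyWithCapacity 100001).insert (pvWrap N)) [(N, 0)]

-- ===== PORT B =====
-- one `d` of the inner `for d in (x-1, x+1):` each: guard, mark, collect into nxt
def bStep1 (vis : Std.HashSet Int) (x : Int) (nxt : List Int) : Std.HashSet Int × List Int :=
  if 0 ≤ x - 1 ∧ x - 1 ≤ 100000 ∧ vis.contains (x-1) = false ∧ x - 1 ≠ 2*x then
    (vis.insert (x-1), nxt ++ [x-1]) else (vis, nxt)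

def bStep2 (vis : Std.HashSet Int) (x : Int) (nxt : List Int) : Std.HashSet Int × List Int :=
  if 0 ≤ x + 1 ∧ x + 1 ≤ 100000 ∧ vis.contains (x+1) = false ∧ x + 1 ≠ 2*x then
    (vis.insert (x+1), nxt ++ [x+1]) else (vis, nxt)

-- inner `while True:` — follow the free doubling chain from x, collecting the
-- ±1 neighbours of each chain element into the next layer
def chainLoop (K : Int) (fuel : Nat) (vis : Std.HashSet Int) (x : Int) (t : Int)
    (nxt : List Int) : Int ⊕ (Nat × Std.HashSet Int × List Int) :=
  match fuel with
  | 0 => Sum.inl (-1)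
  | Nat.succ fuel =>
    if x = K then Sum.inl t
    else
      let u1 := bStep1 vis x nxt
      let u2 := bStep2 u1.1 x u1.2
      if 0 ≤ 2*x ∧ 2*x ≤ 100000 ∧ u2.1.contains (2*x) = false then
        chainLoop K fuel (u2.1.insert (2*x)) (2*x) t u2.2
      else Sum.inr (fuel, u2.1, u2.2)

-- `for p in cur:` over the current layer
def layerLoop (K : Int) (fuel : Nat) (vis : Std.HashSet Int) (cur : List Int) (t : Int)
    (nxt : List Int) : Int ⊕ (Nat × Std.HashSet Int × List Int) :=
  match cur with
  | [] => Sum.inr (fuel, vis, nxt)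
  | p :: rest =>
    match chainLoop K fuel vis p t nxt with
    | Sum.inl tm => Sum.inl tm
    | Sum.inr (f', v', n') => layerLoop K f' v' rest t n'

-- fuel accounting (cited by outerLoop's decreasing_by): a non-empty layer consumes fuel
theorem chain_fuel (K : Int) (fuel : Nat) (vis : Std.HashSet Int) (x t : Int)
    (nxt : List Int) (f' : Nat) (v' : Std.HashSet Int) (n' : List Int)
    (h : chainLoop K fuel vis x t nxt = Sum.inr (f', v', n')) : f' < fuel := by
  fun_induction chainLoop K fuel vis x t nxt generalizing f' v' n'
  case _ => simp at h
  case _ => simp at h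
  case _ =>
    rename_i vis x nxt fuel hk u1 u2 hy ih
    exact Nat.lt_succ_of_lt (ih f' v' n' h)
  case _ =>
    rename_i vis x nxt fuel hk u1 u2 hy
    simp only [Sum.inr.injEq, Prod.mk.injEq] at h
    omega

theorem layer_fuel_le (K : Int) (cur : List Int) (fuel : Nat) (vis : Std.HashSet Int)
    (t : Int) (nxt : List Int) (f' : Nat) (v' : Std.HashSet Int) (n' : List Int)
    (h : layerLoop K fuel vis cur t nxt = Sum.inr (f', v', n')) : f' ≤ fuel := by
  induction cur generalizing fuel vis nxt f' v' n' with
  | nil =>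
    rw [layerLoop] at h
    simp only [Sum.inr.injEq, Prod.mk.injEq] at h
    omega
  | cons p rest ih =>
    rw [layerLoop] at h
    cases hc : chainLoop K fuel vis p t nxt with
    | inl tm => rw [hc] at h; simp at h
    | inr w =>
      obtain ⟨f'', v'', n''⟩ := w
      rw [hc] at h
      simp only at h
      have h1 := chain_fuel K fuel vis p t nxt f'' v'' n'' hc
      have h2 := ih f'' v'' n'' f' v' n' h
      omega

theorem layer_fuel_lt (K : Int) (p : Int) (rest : List Int) (fuel : Nat)
    (vis : Std.HashSet Int) (t : Int) (nxt : List Int) (f' : Nat) (v' : Std.HashSet Int)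
    (n' : List Int) (h : layerLoop K fuel vis (p :: rest) t nxt = Sum.inr (f', v', n')) :
    f' < fuel := by
  rw [layerLoop] at h
  cases hc : chainLoop K fuel vis p t nxt with
  | inl tm => rw [hc] at h; simp at h
  | inr w =>
    obtain ⟨f'', v'', n''⟩ := w
    rw [hc] at h
    simp only at h
    have h1 := chain_fuel K fuel vis p t nxt f'' v'' n'' hc
    have h2 := layer_fuel_le K rest f'' v'' t n'' f' v' n' h
    omega

-- `while cur:` with the layer counter t
def outerLoop (K : Int) (fuel : Nat) (vis : Std.HashSet Int) (cur : List Int) (t : Int) : Int :=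
  match cur with
  | [] => -1
  | p :: rest =>
    match h : layerLoop K fuel vis (p :: rest) t [] with
    | Sum.inl tm => tm
    | Sum.inr (f', v', n') => outerLoop K f' v' n' (t+1)
  termination_by fuel
  decreasing_by exact layer_fuel_lt K p rest fuel vis t [] f' v' n' h

def bfs_alt (N : Int) (K : Int) : Int :=
  outerLoop K 300000 ((Std.HashSet.emptyWithCapacity 100001).insert (pvWrap N)) [N] 0

-- ===== PRECONDITION & SPEC =====
-- Pre_ = exactly where Python's `visited[N] = True` does not raise IndexError
-- (both Pythons raise outside it); K is unconstrained.
def Pre_bfs (N : Int) (K : Int) : Prop := -100001 ≤ N ∧ N ≤ 100000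
instance (N : Int) (K : Int) : Decidable (Pre_bfs N K) := by unfold Pre_bfs; infer_instance
def pvWitness_bfs : Int × Int := (5, 17)

def Spec_bfs (N : Int) (K : Int) (out : Int) : Prop := out = bfs_alt N K
instance (N : Int) (K : Int) (out : Int) : Decidable (Spec_bfs N K out) := by unfold Spec_bfs; infer_instance

-- ===== CLAIM (what is proved, stated in full; the proofs are below) =====
def Claim_equal_bfs : Prop := ∀ (N : Int) (K : Int), Dom_bfs N K → Pre_bfs N K → Spec_bfs N K (bfs N K)

-- ===== LEMMAS AND PROOFS =====

-- correspondence of the guarded pushes: A appending (z, t+1) at the deque's back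
-- is B appending z to nxt, under the layered-queue shape
theorem corr1 (vis : Std.HashSet Int) (p t : Int) (restM : List (Int × Int)) (nxt : List Int) :
    aStep1 vis (restM ++ nxt.map (fun z => (z, t+1))) p t
      = ((bStep1 vis p nxt).1, restM ++ ((bStep1 vis p nxt).2).map (fun z => (z, t+1))) := by
  unfold aStep1 bStep1
  by_cases h : 0 ≤ p - 1 ∧ p - 1 ≤ 100000 ∧ vis.contains (p-1) = false
  · rw [if_pos h, if_pos ⟨h.1, h.2.1, h.2.2, by omega⟩]
    simp
  · rw [if_neg h, if_neg (fun hc => h ⟨hc.1, hc.2.1, hc.2.2.1⟩)]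

theorem corr2 (vis : Std.HashSet Int) (p t : Int) (restM : List (Int × Int)) (nxt : List Int)
    (hne : p + 1 ≠ 2*p) :
    aStep2 vis (restM ++ nxt.map (fun z => (z, t+1))) p t
      = ((bStep2 vis p nxt).1, restM ++ ((bStep2 vis p nxt).2).map (fun z => (z, t+1))) := by
  unfold aStep2 bStep2
  by_cases h : 0 ≤ p + 1 ∧ p + 1 ≤ 100000 ∧ vis.contains (p+1) = false
  · rw [if_pos h, if_neg hne, if_pos ⟨h.1, h.2.1, h.2.2, hne⟩]
    simp
  · rw [if_neg h, if_neg (fun hc => h ⟨hc.1, hc.2.1, hc.2.2.1⟩)]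

-- lockstep invariant, chain level: A's deque is always
--   (chain head, t) :: (rest of current layer, t) ++ (next layer, t+1),
-- and both sides burn one fuel unit per processed position
theorem chain_step (K : Int) (fuel : Nat) (vis : Std.HashSet Int) (p t : Int)
    (rest nxt : List Int) :
    bfsLoop K fuel vis ((p, t) :: (rest.map (fun z => (z, t)) ++ nxt.map (fun z => (z, t+1))))
    = match chainLoop K fuel vis p t nxt with
      | Sum.inl tm => tm
      | Sum.inr (f', v', n') =>
          bfsLoop K f' v' (rest.map (fun z => (z, t)) ++ n'.map (fun z => (z, t+1))) := by
  fun_induction chainLoop K fuel vis p t nxt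
  case _ =>
    rename_i vis x nxt
    rw [bfsLoop]
  case _ =>
    rename_i vis nxt fuel
    rw [bfsLoop]
    simp
  case _ =>
    rename_i vis x nxt fuel hk u1 u2 hy ih
    have hu1 : bStep1 vis x nxt = u1 := rfl
    have hu2 : bStep2 u1.1 x u1.2 = u2 := rfl
    rw [bfsLoop]
    simp only [if_neg hk]
    rw [corr1 vis x t (rest.map (fun z => (z, t))) nxt, hu1]
    by_cases hp : x + 1 = 2*x
    · have hx1 : x = 1 := by omega
      subst hx1
      have hu2' : u2 = u1 := by
        rw [← hu2]
        unfold bStep2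
        rw [if_neg (fun hc => hc.2.2.2 rfl)]
      rw [hu2'] at hy ih ⊢
      have h2 : (2:Int) ∉ u1.1 := by
        have := hy.2.2
        norm_num at this
        exact this
      unfold aStep2
      rw [if_pos (show (0:Int) ≤ 1 + 1 ∧ (1:Int) + 1 ≤ 100000 ∧ u1.1.contains (1+1) = false by
        refine ⟨by norm_num, by norm_num, ?_⟩
        norm_num
        exact h2)]
      rw [if_pos (show (1:Int) + 1 = 2*1 by norm_num)]
      simp only
      unfold aStep3
      rw [if_neg (show ¬((0:Int) ≤ 2*1 ∧ (2:Int)*1 ≤ 100000 ∧ (u1.1.insert (1+1)).contains (2*1) = false) from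
        fun hc => by
          have hcc := hc.2.2
          norm_num at hcc)]
      simp only
      have e21 : ((2:Int)*1) = (1:Int) + 1 := by norm_num
      rw [e21] at ih
      exact ih
    · rw [corr2 u1.1 x t (rest.map (fun z => (z, t))) u1.2 hp, hu2]
      have hy' : 0 ≤ 2*x ∧ 2*x ≤ 100000 ∧ u2.1.contains (2*x) = false := hy
      unfold aStep3
      rw [if_pos hy']
      simp only
      exact ih
  case _ =>
    rename_i vis x nxt fuel hk u1 u2 hy
    have hu1 : bStep1 vis x nxt = u1 := rfl
    have hu2 : bStep2 u1.1 x u1.2 = u2 := rfl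
    rw [bfsLoop]
    simp only [if_neg hk]
    rw [corr1 vis x t (rest.map (fun z => (z, t))) nxt, hu1]
    by_cases hp : x + 1 = 2*x
    · have hx1 : x = 1 := by omega
      subst hx1
      have hu2' : u2 = u1 := by
        rw [← hu2]
        unfold bStep2
        rw [if_neg (fun hc => hc.2.2.2 rfl)]
      rw [hu2'] at hy ⊢
      have h2 : (2:Int) ∈ u1.1 := by
        by_contra hcc
        exact hy ⟨by norm_num, by norm_num, by norm_num; exact hcc⟩
      unfold aStep2
      rw [if_neg (show ¬((0:Int) ≤ 1 + 1 ∧ (1:Int) + 1 ≤ 100000 ∧ u1.1.contains (1+1) = false) from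
        fun hc => by
          have hcc := hc.2.2
          norm_num at hcc
          exact hcc h2)]
      simp only
      unfold aStep3
      rw [if_neg (show ¬((0:Int) ≤ 2*1 ∧ (2:Int)*1 ≤ 100000 ∧ u1.1.contains (2*1) = false) from
        fun hc => by
          have hcc := hc.2.2
          norm_num at hcc
          exact hcc h2)]
    · rw [corr2 u1.1 x t (rest.map (fun z => (z, t))) u1.2 hp, hu2]
      unfold aStep3
      rw [if_neg hy]

theorem layer_eq (K : Int) (cur : List Int) (fuel : Nat) (vis : Std.HashSet Int) (t : Int)
    (nxt : List Int) :
    bfsLoop K fuel vis (cur.map (fun z => (z, t)) ++ nxt.map (fun z => (z, t+1)))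
    = match layerLoop K fuel vis cur t nxt with
      | Sum.inl tm => tm
      | Sum.inr (f', v', n') => bfsLoop K f' v' (n'.map (fun z => (z, t+1))) := by
  induction cur generalizing fuel vis nxt with
  | nil => rw [layerLoop]; simp
  | cons p rest ih =>
    rw [layerLoop]
    have hq : (p :: rest).map (fun z => (z, t)) ++ nxt.map (fun z => (z, t+1))
        = (p, t) :: (rest.map (fun z => (z, t)) ++ nxt.map (fun z => (z, t+1))) := by simp
    rw [hq, chain_step]
    cases hc : chainLoop K fuel vis p t nxt with
    | inl tm => simp
    | inr w =>
      obtain ⟨f', v', n'⟩ := w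
      simp only
      exact ih f' v' n'

theorem outer_eq (K : Int) (fuel : Nat) (vis : Std.HashSet Int) (cur : List Int) (t : Int) :
    bfsLoop K fuel vis (cur.map (fun z => (z, t))) = outerLoop K fuel vis cur t := by
  fun_induction outerLoop K fuel vis cur t
  case _ =>
    rename_i fuel vis t
    simp only [List.map_nil]
    rw [bfsLoop]
  case _ =>
    rename_i fuel vis t p rest tm h
    have hq : (p :: rest).map (fun z => (z, t)) = (p :: rest).map (fun z => (z, t)) ++ ([] : List Int).map (fun z => (z, t+1)) := by simp
    rw [hq, layer_eq, h]
  case _ =>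
    rename_i fuel vis t p rest f' v' n' h ih
    have hq : (p :: rest).map (fun z => (z, t)) = (p :: rest).map (fun z => (z, t)) ++ ([] : List Int).map (fun z => (z, t+1)) := by simp
    rw [hq, layer_eq, h]
    exact ih

-- ===== VERDICT (by name: the statement is the Claim_ definition above) =====
theorem bfs_spec : Claim_equal_bfs := by
  intro N K _ _
  unfold Spec_bfs bfs bfs_alt
  have h := outer_eq K 300000 ((Std.HashSet.emptyWithCapacity 100001).insert (pvWrap N)) [N] 0
  simpa using h
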